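-- pv_equiv track=rewrite | github.com/sebastianspicker/outlook-email-rag | src/case_analysis_scope.py | _artifact_matches_expected_class
-- ===== SOURCE A (Python) =====
-- from typing import Any
--
-- def _artifact_matches_expected_class(artifact: dict[str, Any], expected_class: str) -> bool:
--     source_class = str(artifact.get("source_class") or "").casefold()
--     filename = str(artifact.get("filename") or artifact.get("title") or "").casefold()
--     text = " ".join(
--         str(artifact.get(field) or "").casefold() for field in ("title", "filename", "summary", "source_path", "text")
--     )
--     if expected_class == "formal_document":
--         return bool(
--             source_class in {"formal_document", "meeting_note", "note_record"} or filename.endswith((".html", ".pdf", ".docx"))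
--         )
--     if expected_class == "calendar_record":
--         return bool(
--             source_class in {"calendar_export", "calendar_record"}
--             or filename.endswith((".ics", ".vcs"))
--             or any(token in text for token in ("calendar", "invite", "einladung", "termin"))
--         )
--     if expected_class == "time_record":
--         return bool(
--             source_class in {"time_record", "spreadsheet"}
--             or filename.endswith((".csv", ".xlsx", ".xls"))
--             or any(token in text for token in ("time system", "timesheet", "arbeitszeit", "zeiterfassung"))
--         )
--     if expected_class == "classification_record":
--         return any(token in text for token in ("eg12", "e12", "eingruppierung", "tarif", "payroll", "entgelt"))
--     if expected_class == "comparator_record":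
--         return any(token in text for token in ("vergleich", "comparator", "kolleg", "peer"))
--     if expected_class == "medical_or_bem_record":
--         return any(token in text for token in ("bem", "prävention", "prevention", "medizin", "medical", "sgb ix"))
--     return False
-- ===== SOURCE B (Python) =====
-- from typing import Any
--
-- # Flat rule relation: (class, kind, pattern).  The matcher is one linear scan
-- # over this relation instead of a per-class branch of hand-written checks.
-- _RULES: list[tuple[str, str, str]] = [
--     ("formal_document", "source", "formal_document"),
--     ("formal_document", "source", "meeting_note"),
--     ("formal_document", "source", "note_record"),
--     ("formal_document", "suffix", ".html"),
--     ("formal_document", "suffix", ".pdf"),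
--     ("formal_document", "suffix", ".docx"),
--     ("calendar_record", "source", "calendar_export"),
--     ("calendar_record", "source", "calendar_record"),
--     ("calendar_record", "suffix", ".ics"),
--     ("calendar_record", "suffix", ".vcs"),
--     ("calendar_record", "token", "calendar"),
--     ("calendar_record", "token", "invite"),
--     ("calendar_record", "token", "einladung"),
--     ("calendar_record", "token", "termin"),
--     ("time_record", "source", "time_record"),
--     ("time_record", "source", "spreadsheet"),
--     ("time_record", "suffix", ".csv"),
--     ("time_record", "suffix", ".xlsx"),
--     ("time_record", "suffix", ".xls"),
--     ("time_record", "token", "time system"),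
--     ("time_record", "token", "timesheet"),
--     ("time_record", "token", "arbeitszeit"),
--     ("time_record", "token", "zeiterfassung"),
--     ("classification_record", "token", "eg12"),
--     ("classification_record", "token", "e12"),
--     ("classification_record", "token", "eingruppierung"),
--     ("classification_record", "token", "tarif"),
--     ("classification_record", "token", "payroll"),
--     ("classification_record", "token", "entgelt"),
--     ("comparator_record", "token", "vergleich"),
--     ("comparator_record", "token", "comparator"),
--     ("comparator_record", "token", "kolleg"),
--     ("comparator_record", "token", "peer"),
--     ("medical_or_bem_record", "token", "bem"),
--     ("medical_or_bem_record", "token", "pr\u00e4vention"),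
--     ("medical_or_bem_record", "token", "prevention"),
--     ("medical_or_bem_record", "token", "medizin"),
--     ("medical_or_bem_record", "token", "medical"),
--     ("medical_or_bem_record", "token", "sgb ix"),
-- ]
--
-- def _artifact_matches_expected_class(artifact: dict[str, Any], expected_class: str) -> bool:
--     source_class = str(artifact.get("source_class") or "").casefold()
--     filename = str(artifact.get("filename") or artifact.get("title") or "").casefold()
--     text = " ".join(
--         str(artifact.get(field) or "").casefold() for field in ("title", "filename", "summary", "source_path", "text")
--     )
--
--     def fires(kind: str, pattern: str) -> bool:
--         if kind == "source":
--             return pattern == source_class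
--         if kind == "suffix":
--             return filename.endswith(pattern)
--         return pattern in text
--
--     return any(cls == expected_class and fires(kind, pattern) for cls, kind, pattern in _RULES)
-- ===== Notes on version B (the rewrite author's own statement) =====
-- stated objective: alternative
-- what changed: Replaced A's six-way if/elif chain of per-class hand-written checks by a flat (class, kind, pattern) rule relation scanned in a single any() pass with one generic kind dispatcher.
import Mathlib
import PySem

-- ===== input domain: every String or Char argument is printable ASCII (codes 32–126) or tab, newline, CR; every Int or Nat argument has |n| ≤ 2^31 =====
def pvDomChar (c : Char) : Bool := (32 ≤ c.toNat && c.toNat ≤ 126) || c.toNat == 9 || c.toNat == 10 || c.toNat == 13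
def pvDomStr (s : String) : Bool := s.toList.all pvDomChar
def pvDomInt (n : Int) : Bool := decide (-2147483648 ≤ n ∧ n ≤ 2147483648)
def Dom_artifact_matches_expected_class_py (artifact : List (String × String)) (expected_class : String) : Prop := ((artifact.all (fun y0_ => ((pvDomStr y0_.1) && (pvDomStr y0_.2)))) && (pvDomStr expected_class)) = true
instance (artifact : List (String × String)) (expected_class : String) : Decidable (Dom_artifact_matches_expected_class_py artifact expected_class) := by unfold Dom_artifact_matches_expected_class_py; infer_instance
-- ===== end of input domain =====

-- B replaces A's six-way if/elif chain by one linear scan over a flat (class, kind, pattern) rule relation (objective: alternative).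
-- casefold is ported as PySem.Str.lower, exact on the ASCII domain.

-- ===== PORT A =====
def artifact_matches_expected_class_py (artifact : List (String × String)) (expected_class : String) : Bool :=
  let d := PySem.Dict.mk artifact
  let source_class := PySem.Str.lower ((d.get? "source_class").getD "")
  let f0 := (d.get? "filename").getD ""
  let filename := PySem.Str.lower (if f0 == "" then (d.get? "title").getD "" else f0)
  let text := PySem.Str.join " "
    ((["title", "filename", "summary", "source_path", "text"]).map
      (fun field => PySem.Str.lower ((d.get? field).getD "")))
  if expected_class == "formal_document" then
    PySem.Set.contains (PySem.Set.ofList ["formal_document", "meeting_note", "note_record"]) source_class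
      || (PySem.Str.endswith filename ".html" || PySem.Str.endswith filename ".pdf" || PySem.Str.endswith filename ".docx")
  else if expected_class == "calendar_record" then
    PySem.Set.contains (PySem.Set.ofList ["calendar_export", "calendar_record"]) source_class
      || (PySem.Str.endswith filename ".ics" || PySem.Str.endswith filename ".vcs")
      || (["calendar", "invite", "einladung", "termin"].any (fun token => PySem.Str.isIn token text))
  else if expected_class == "time_record" then
    PySem.Set.contains (PySem.Set.ofList ["time_record", "spreadsheet"]) source_class
      || (PySem.Str.endswith filename ".csv" || PySem.Str.endswith filename ".xlsx" || PySem.Str.endswith filename ".xls")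
      || (["time system", "timesheet", "arbeitszeit", "zeiterfassung"].any (fun token => PySem.Str.isIn token text))
  else if expected_class == "classification_record" then
    (["eg12", "e12", "eingruppierung", "tarif", "payroll", "entgelt"].any (fun token => PySem.Str.isIn token text))
  else if expected_class == "comparator_record" then
    (["vergleich", "comparator", "kolleg", "peer"].any (fun token => PySem.Str.isIn token text))
  else if expected_class == "medical_or_bem_record" then
    (["bem", "prävention", "prevention", "medizin", "medical", "sgb ix"].any (fun token => PySem.Str.isIn token text))
  else false

-- ===== PORT B =====
-- the flat rule relation _RULES of Source B: (class, kind, pattern)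
def pvRules : List (String × String × String) :=
  [ ("formal_document", "source", "formal_document"),
    ("formal_document", "source", "meeting_note"),
    ("formal_document", "source", "note_record"),
    ("formal_document", "suffix", ".html"),
    ("formal_document", "suffix", ".pdf"),
    ("formal_document", "suffix", ".docx"),
    ("calendar_record", "source", "calendar_export"),
    ("calendar_record", "source", "calendar_record"),
    ("calendar_record", "suffix", ".ics"),
    ("calendar_record", "suffix", ".vcs"),
    ("calendar_record", "token", "calendar"),
    ("calendar_record", "token", "invite"),
    ("calendar_record", "token", "einladung"),
    ("calendar_record", "token", "termin"),
    ("time_record", "source", "time_record"),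
    ("time_record", "source", "spreadsheet"),
    ("time_record", "suffix", ".csv"),
    ("time_record", "suffix", ".xlsx"),
    ("time_record", "suffix", ".xls"),
    ("time_record", "token", "time system"),
    ("time_record", "token", "timesheet"),
    ("time_record", "token", "arbeitszeit"),
    ("time_record", "token", "zeiterfassung"),
    ("classification_record", "token", "eg12"),
    ("classification_record", "token", "e12"),
    ("classification_record", "token", "eingruppierung"),
    ("classification_record", "token", "tarif"),
    ("classification_record", "token", "payroll"),
    ("classification_record", "token", "entgelt"),
    ("comparator_record", "token", "vergleich"),
    ("comparator_record", "token", "comparator"),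
    ("comparator_record", "token", "kolleg"),
    ("comparator_record", "token", "peer"),
    ("medical_or_bem_record", "token", "bem"),
    ("medical_or_bem_record", "token", "prävention"),
    ("medical_or_bem_record", "token", "prevention"),
    ("medical_or_bem_record", "token", "medizin"),
    ("medical_or_bem_record", "token", "medical"),
    ("medical_or_bem_record", "token", "sgb ix") ]

def artifact_matches_expected_class_py_alt (artifact : List (String × String)) (expected_class : String) : Bool :=
  let d := PySem.Dict.mk artifact
  let source_class := PySem.Str.lower ((d.get? "source_class").getD "")
  let f0 := (d.get? "filename").getD ""
  let filename := PySem.Str.lower (if f0 == "" then (d.get? "title").getD "" else f0)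
  let text := PySem.Str.join " "
    ((["title", "filename", "summary", "source_path", "text"]).map
      (fun field => PySem.Str.lower ((d.get? field).getD "")))
  let fires := fun (kind pattern : String) =>
    if kind == "source" then pattern == source_class
    else if kind == "suffix" then PySem.Str.endswith filename pattern
    else PySem.Str.isIn pattern text
  pvRules.any (fun r => r.1 == expected_class && fires r.2.1 r.2.2)

-- ===== PRECONDITION & SPEC =====
def Spec_artifact_matches_expected_class_py (artifact : List (String × String)) (expected_class : String) (out : Bool) : Prop := out = artifact_matches_expected_class_py_alt artifact expected_class
instance (artifact : List (String × String)) (expected_class : String) (out : Bool) : Decidable (Spec_artifact_matches_expected_class_py artifact expected_class out) := by unfold Spec_artifact_matches_expected_class_py; infer_instance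

-- ===== CLAIM (what is proved, stated in full; the proofs are below) =====
def Claim_equal_artifact_matches_expected_class_py : Prop := ∀ (artifact : List (String × String)) (expected_class : String), Dom_artifact_matches_expected_class_py artifact expected_class → Spec_artifact_matches_expected_class_py artifact expected_class (artifact_matches_expected_class_py artifact expected_class)

-- ===== LEMMAS AND PROOFS =====
theorem pv_beq_comm (a b : String) : (a == b) = decide (b = a) := by
  by_cases h : a = b
  · simp [h]
  · simp [h, Ne.symm h]

-- ===== VERDICT (by name: the statement is the Claim_ definition above) =====
set_option maxHeartbeats 1600000 in
theorem artifact_matches_expected_class_py_spec : Claim_equal_artifact_matches_expected_class_py := by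
  intro artifact e _
  unfold Spec_artifact_matches_expected_class_py artifact_matches_expected_class_py artifact_matches_expected_class_py_alt pvRules
  by_cases h1 : e = "formal_document"
  · subst h1; simp [PySem.Set.ofList, PySem.Set.add, pv_beq_comm, Bool.or_assoc]
  by_cases h2 : e = "calendar_record"
  · subst h2; simp [PySem.Set.ofList, PySem.Set.add, pv_beq_comm, Bool.or_assoc]
  by_cases h3 : e = "time_record"
  · subst h3; simp [PySem.Set.ofList, PySem.Set.add, pv_beq_comm, Bool.or_assoc]
  by_cases h4 : e = "classification_record"
  · subst h4; simp [pv_beq_comm]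
  by_cases h5 : e = "comparator_record"
  · subst h5; simp [pv_beq_comm]
  by_cases h6 : e = "medical_or_bem_record"
  · subst h6; simp [pv_beq_comm]
  have b1 : ("formal_document" == e) = false := by simp [Ne.symm h1]
  have b2 : ("calendar_record" == e) = false := by simp [Ne.symm h2]
  have b3 : ("time_record" == e) = false := by simp [Ne.symm h3]
  have b4 : ("classification_record" == e) = false := by simp [Ne.symm h4]
  have b5 : ("comparator_record" == e) = false := by simp [Ne.symm h5]
  have b6 : ("medical_or_bem_record" == e) = false := by simp [Ne.symm h6]
  simp [h1, h2, h3, h4, h5, h6, b1, b2, b3, b4, b5, b6]
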